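-- pv_equiv track=rewrite | github.com/swstegall/meteor-decomp | tools/extract_receiver_actorimpl_map.py | containing_fn
-- ===== SOURCE A (Python) =====
-- def containing_fn(idx, rva):
--     lo, hi = 0, len(idx)
--     while lo < hi:
--         mid = (lo + hi) // 2
--         if idx[mid][0] <= rva:
--             lo = mid + 1
--         else:
--             hi = mid
--     if lo == 0:
--         return None
--     return idx[lo - 1]
-- ===== SOURCE B (Python) =====
-- def containing_fn(idx, rva):
--     def insertion_point(sub):
--         # number of probes' worth of elements <= rva, by splitting the slice itself
--         if not sub:
--             return 0
--         mid = len(sub) // 2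
--         if sub[mid][0] <= rva:
--             return mid + 1 + insertion_point(sub[mid + 1:])
--         return insertion_point(sub[:mid])
--     p = insertion_point(idx)
--     return idx[p - 1] if p else None
-- ===== Notes on version B (the rewrite author's own statement) =====
-- stated objective: alternative
-- what changed: The iterative (lo,hi) index-bookkeeping bisection is replaced by a recursion that physically splits the list into slices (sub[:mid] / sub[mid+1:]) and sums the offsets, keeping the identical probe sequence so behaviour matches even on unsorted idx.
import Mathlib
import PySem

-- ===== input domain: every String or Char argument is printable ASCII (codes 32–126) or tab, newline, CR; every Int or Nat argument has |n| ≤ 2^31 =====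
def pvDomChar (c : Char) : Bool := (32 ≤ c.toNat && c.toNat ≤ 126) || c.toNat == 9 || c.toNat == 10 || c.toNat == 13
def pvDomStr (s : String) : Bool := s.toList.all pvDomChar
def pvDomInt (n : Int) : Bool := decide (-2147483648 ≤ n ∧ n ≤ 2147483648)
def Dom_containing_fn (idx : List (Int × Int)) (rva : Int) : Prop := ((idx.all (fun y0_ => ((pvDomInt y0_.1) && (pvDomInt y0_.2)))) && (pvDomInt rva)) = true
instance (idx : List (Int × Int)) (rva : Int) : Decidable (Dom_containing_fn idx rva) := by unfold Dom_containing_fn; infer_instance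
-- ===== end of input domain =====

-- B replaces A's iterative (lo,hi) binary search with a recursion that splits the list into slices and sums offsets (same probe sequence); objective: alternative decomposition, no speed claim.


-- ===== PORT A =====
-- while lo < hi: mid = (lo+hi)//2; if idx[mid][0] <= rva: lo = mid+1 else: hi = mid
def containing_fn_loop (idx : List (Int × Int)) (rva : Int) (lo hi : Nat) : Nat :=
  if lo < hi then
    let mid := (lo + hi) / 2
    if (idx.getD mid (0, 0)).1 ≤ rva then
      containing_fn_loop idx rva (mid + 1) hi
    else
      containing_fn_loop idx rva lo mid
  else lo
termination_by hi - lo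
decreasing_by all_goals omega

def containing_fn (idx : List (Int × Int)) (rva : Int) : Option (Int × Int) :=
  let lo := containing_fn_loop idx rva 0 idx.length
  if lo = 0 then none
  else some (idx.getD (lo - 1) (0, 0))

-- ===== PORT B =====
-- insertion_point(sub): recursion on physical slices sub[:mid] / sub[mid+1:], summing offsets
def containing_fn_insertion_point (rva : Int) (sub : List (Int × Int)) : Nat :=
  if sub.isEmpty then 0
  else
    let mid := sub.length / 2
    if (sub.getD mid (0, 0)).1 ≤ rva then
      mid + 1 + containing_fn_insertion_point rva (sub.drop (mid + 1))
    else
      containing_fn_insertion_point rva (sub.take mid)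
termination_by sub.length
decreasing_by
  all_goals
    rename_i h _
    have hl : 0 < sub.length := by cases sub <;> simp_all
    simp
    omega

def containing_fn_alt (idx : List (Int × Int)) (rva : Int) : Option (Int × Int) :=
  let p := containing_fn_insertion_point rva idx
  if p = 0 then none else some (idx.getD (p - 1) (0, 0))

-- ===== PRECONDITION & SPEC =====
def Spec_containing_fn (idx : List (Int × Int)) (rva : Int) (out : Option (Int × Int)) : Prop := out = containing_fn_alt idx rva
instance (idx : List (Int × Int)) (rva : Int) (out : Option (Int × Int)) : Decidable (Spec_containing_fn idx rva out) := by unfold Spec_containing_fn; infer_instance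

-- ===== CLAIM =====
def Claim_equal_containing_fn : Prop := ∀ (idx : List (Int × Int)) (rva : Int), Dom_containing_fn idx rva → Spec_containing_fn idx rva (containing_fn idx rva)

-- ===== LEMMAS AND PROOFS =====

-- A's loop on window [lo,hi) equals lo plus B's recursion on the slice idx[lo:hi].
theorem loop_eq_insertion_point (idx : List (Int × Int)) (rva : Int) :
    ∀ (n lo hi : Nat), hi - lo = n → hi ≤ idx.length →
      containing_fn_loop idx rva lo hi =
        lo + containing_fn_insertion_point rva ((idx.drop lo).take (hi - lo)) := by
  intro n
  induction n using Nat.strong_induction_on with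
  | _ n ih =>
    intro lo hi hn hlen
    by_cases hlt : lo < hi
    · have hsublen : ((idx.drop lo).take (hi - lo)).length = hi - lo := by
        simp; omega
      have hne : ¬ ((idx.drop lo).take (hi - lo)).isEmpty = true := by
        simp
        omega
      have hmid : (lo + hi) / 2 = lo + (hi - lo) / 2 := by omega
      have hget : ((idx.drop lo).take (hi - lo)).getD ((hi - lo) / 2) (0, 0)
          = idx.getD (lo + (hi - lo) / 2) (0, 0) := by
        simp [List.getD_eq_getElem?_getD, List.getElem?_take, List.getElem?_drop,
          Nat.div_lt_iff_lt_mul, show (hi - lo) / 2 < hi - lo by omega]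
      rw [containing_fn_loop, if_pos hlt,
          containing_fn_insertion_point, if_neg hne]
      simp only [hsublen, hmid, hget]
      set m : Nat := (hi - lo) / 2 with hm
      have hmlt : m < hi - lo := by omega
      by_cases hc : (idx.getD (lo + m) (0, 0)).1 ≤ rva
      · rw [if_pos hc, if_pos hc]
        have hdrop : ((idx.drop lo).take (hi - lo)).drop (m + 1)
            = (idx.drop (lo + (m + 1))).take (hi - (lo + (m + 1))) := by
          rw [List.drop_take, List.drop_drop]
          congr 1 <;> omega
        rw [hdrop]
        have hrec := ih (hi - (lo + (m + 1))) (by omega) (lo + (m + 1)) hi (by omega) hlen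
        rw [show lo + m + 1 = lo + (m + 1) by omega, hrec]
        omega
      · rw [if_neg hc, if_neg hc]
        have htake : ((idx.drop lo).take (hi - lo)).take m = (idx.drop lo).take m := by
          rw [List.take_take]
          congr 1
          omega
        have hrec := ih (lo + m - lo) (by omega) lo (lo + m) (by omega) (by omega)
        simp only [Nat.add_sub_cancel_left] at hrec
        rw [htake, hrec]
    · rw [containing_fn_loop, if_neg hlt]
      have h0 : hi - lo = 0 := by omega
      rw [h0]
      simp [containing_fn_insertion_point]

-- ===== VERDICT =====
theorem containing_fn_spec : Claim_equal_containing_fn := by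
  intro idx rva _
  unfold Spec_containing_fn containing_fn containing_fn_alt
  rw [loop_eq_insertion_point idx rva idx.length 0 idx.length rfl (le_refl _)]
  simp
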